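-- pv_equiv track=rewrite | github.com/aniketmondal1210/GFG-Chronicles | Difficulty: Medium/Unique Number II/unique_number_ii.py | singleNum
-- ===== SOURCE A (Python) =====
-- from collections import Counter
--
-- def singleNum(arr):
-- 	# Code here
-- 	result = []
-- 	a = Counter(arr)
-- 	for key, value in a.items():
-- 	    if value < 2:
-- 	        result.append(key)
-- 	result.sort()
-- 	return result
-- ===== SOURCE B (Python) =====
-- def singleNum(arr):
--     s = sorted(arr)
--     res = []
--     i, n = 0, len(s)
--     while i < n:
--         j = i + 1
--         while j < n and s[j] == s[i]:
--             j += 1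
--         if j == i + 1:
--             res.append(s[i])
--         i = j
--     return res
-- ===== Notes on version B (the rewrite author's own statement) =====
-- stated objective: alternative
-- what changed: Replaced A's Counter/filter-items/final-sort pipeline with sorting first and then one linear run-length scan of the sorted list that emits values whose run has length exactly 1, so no counting table and no final sort are needed.
import Mathlib
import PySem

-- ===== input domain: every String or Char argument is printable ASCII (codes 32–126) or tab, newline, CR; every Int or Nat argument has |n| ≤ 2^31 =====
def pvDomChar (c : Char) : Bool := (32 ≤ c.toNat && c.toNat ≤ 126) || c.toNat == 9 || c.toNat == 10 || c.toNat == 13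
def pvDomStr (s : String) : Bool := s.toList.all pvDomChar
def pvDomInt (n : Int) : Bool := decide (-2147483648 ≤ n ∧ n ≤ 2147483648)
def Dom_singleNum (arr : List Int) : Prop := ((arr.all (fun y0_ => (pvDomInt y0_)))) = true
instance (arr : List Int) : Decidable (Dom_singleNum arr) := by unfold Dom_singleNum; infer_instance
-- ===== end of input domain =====

-- B replaces A's Counter-then-filter-then-sort pipeline by sort-first-then-one-run-scan (alternative decomposition, no final sort).


-- ===== PORT A =====
-- result = []; a = Counter(arr); for key, value in a.items(): if value < 2: result.append(key); result.sort()
def singleNum (arr : List Int) : List Int :=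
  let a := PySem.Dict.counter arr
  let result := a.items.foldl (fun res kv => if kv.2 < 2 then res ++ [kv.1] else res) ([] : List Int)
  PySem.List.sorted result (fun x => x) false

-- ===== PORT B =====
-- the outer while over the sorted list; the inner 'while s[j] == s[i]' is the dropWhile skipping the run;
-- a run of length 1 (next element differs from the current one) emits its value
def pvRun (l : List Int) : List Int :=
  match l with
  | [] => []
  | x :: rest =>
    if rest.head? = some x then pvRun (rest.dropWhile (fun z => z == x))
    else x :: pvRun rest
termination_by l.length
decreasing_by
  · have := List.length_dropWhile_le (fun z => z == x) rest; simp; omega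
  · simp

def singleNum_alt (arr : List Int) : List Int :=
  pvRun (PySem.List.sorted arr (fun x => x) false)

-- ===== PRECONDITION & SPEC =====
def Spec_singleNum (arr : List Int) (out : List Int) : Prop := out = singleNum_alt arr
instance (arr : List Int) (out : List Int) : Decidable (Spec_singleNum arr out) := by unfold Spec_singleNum; infer_instance

-- ===== CLAIM (what is proved, stated in full; the proofs are below) =====
def Claim_equal_singleNum : Prop := ∀ (arr : List Int), Dom_singleNum arr → Spec_singleNum arr (singleNum arr)

-- ===== LEMMAS AND PROOFS =====

-- on a ≤-sorted list a value ≤ every element is absent after its leading run is dropped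
theorem pv_not_mem_dropWhile (x : Int) (l : List Int) (h : l.Pairwise (· ≤ ·))
    (hx : ∀ y ∈ l, x ≤ y) : x ∉ l.dropWhile (fun z => z == x) := by
  induction l with
  | nil => simp
  | cons a l' ih =>
    by_cases ha : a = x
    · subst ha
      simpa using ih h.tail (fun y hy => hx y (by simp [hy]))
    · rw [List.dropWhile_cons_of_neg (by simp [ha])]
      intro hmem
      rcases List.mem_cons.mp hmem with h1 | h2
      · exact ha h1.symm
      · have hxa : x ≤ a := hx a (by simp)
        have hax : a ≤ x := (List.pairwise_cons.mp h).1 x h2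
        exact ha (le_antisymm hax hxa)

-- on a ≤-sorted list, B's run scan keeps exactly the elements occurring once
theorem pvRun_eq_filter (l : List Int) (h : l.Pairwise (· ≤ ·)) :
    pvRun l = l.filter (fun x => l.count x == 1) := by
  induction l using pvRun.induct with
  | case1 => simp [pvRun]
  | case2 x rest hh ih =>
    obtain ⟨r', hr⟩ : ∃ r', rest = x :: r' := by
      cases rest with
      | nil => simp at hh
      | cons a tl => simp at hh; exact ⟨tl, by simp [hh]⟩
    have hlow : ∀ y ∈ rest, x ≤ y := (List.pairwise_cons.mp h).1
    have hxt : x ∉ rest.dropWhile (fun z => z == x) :=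
      pv_not_mem_dropWhile x rest h.tail hlow
    have htw : ∀ z ∈ rest.takeWhile (fun z => z == x), z = x := by
      intro z hz
      simpa using List.mem_takeWhile_imp hz
    have hsplit : rest = rest.takeWhile (fun z => z == x) ++ rest.dropWhile (fun z => z == x) :=
      (List.takeWhile_append_dropWhile).symm
    have hpt : (rest.dropWhile (fun z => z == x)).Pairwise (· ≤ ·) :=
      h.tail.sublist (List.dropWhile_sublist _)
    have hcx : ¬ (((x :: rest).count x == 1) = true) := by
      have h2 : 1 ≤ rest.count x := by rw [hr]; simp
      simp
      omega
    have hctw : ∀ z ∈ rest.takeWhile (fun z => z == x),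
        ¬ ((fun w => (x :: rest).count w == 1) z = true) := by
      intro z hz; rw [htw z hz]; exact hcx
    have hct : ∀ z ∈ rest.dropWhile (fun z => z == x),
        ((x :: rest).count z == 1) = ((rest.dropWhile (fun z => z == x)).count z == 1) := by
      intro z hz
      have hzx : z ≠ x := fun hzx => hxt (hzx ▸ hz)
      have hztw : (rest.takeWhile (fun z => z == x)).count z = 0 := by
        rw [List.count_eq_zero]
        intro hzin; exact hzx (htw z hzin)
      congr 1
      rw [List.count_cons, hsplit, List.count_append, hztw]
      simp [Ne.symm hzx]
    rw [pvRun]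
    rw [if_pos hh, ih hpt]
    rw [List.filter_cons, if_neg hcx]
    rw [congrArg (List.filter (fun w => List.count w (x :: rest) == 1)) hsplit]
    rw [List.filter_append, List.filter_eq_nil_iff.mpr hctw, List.nil_append]
    exact (List.filter_congr hct).symm
  | case3 x rest hh ih =>
    have hlow : ∀ y ∈ rest, x ≤ y := (List.pairwise_cons.mp h).1
    have hxmem : x ∉ rest := by
      intro hmem
      cases rest with
      | nil => simp at hmem
      | cons a tl =>
        have hax : a ≤ x := by
          rcases List.mem_cons.mp hmem with h1 | h2
          · exact le_of_eq h1.symm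
          · exact (List.pairwise_cons.mp h.tail).1 x h2
        have hxa : x ≤ a := hlow a (by simp)
        have : a = x := le_antisymm hax hxa
        simp [this] at hh
    have hcx : (x :: rest).count x = 1 := by
      simp [List.count_eq_zero.mpr hxmem]
    have hct : ∀ z ∈ rest, ((x :: rest).count z == 1) = (rest.count z == 1) := by
      intro z hz
      have hzx : z ≠ x := fun hzx => hxmem (hzx ▸ hz)
      congr 1
      simp [Ne.symm hzx]
    rw [pvRun, if_neg hh, ih h.tail]
    rw [List.filter_cons]
    rw [if_pos (by simp [hcx])]
    congr 1
    exact (List.filter_congr hct).symm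

-- A's loop collects, in first-occurrence order, the distinct elements with count < 2
theorem singleNum_loop_eq (arr : List Int) :
    (PySem.Dict.counter arr).items.foldl
        (fun res kv => if kv.2 < 2 then res ++ [kv.1] else res) ([] : List Int)
    = (PySem.Set.ofList arr).filter (fun k => decide ((arr.count k : Int) < 2)) := by
  rw [PySem.List.foldl_append_ite (p := fun kv : Int × Int => kv.2 < 2) (f := Prod.fst)]
  rw [PySem.Dict.items_counter, List.filter_map]
  simp [Function.comp_def]

theorem singleNum_spec : Claim_equal_singleNum := by
  intro arr _
  unfold Spec_singleNum singleNum singleNum_alt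
  simp only []
  rw [singleNum_loop_eq]
  have hsp : (PySem.List.sorted arr (fun x => x) false).Pairwise (· ≤ ·) := by
    simpa using PySem.List.sorted_pairwise arr (fun x => x)
  rw [pvRun_eq_filter _ hsp]
  have hs : ∀ z : Int, z ∈ PySem.List.sorted arr (fun x => x) false ↔ z ∈ arr :=
    fun z => PySem.List.mem_sorted arr (fun x => x) false z
  have hcnt : ∀ z : Int, (PySem.List.sorted arr (fun x => x) false).count z = arr.count z :=
    fun z => (PySem.List.sorted_perm arr (fun x => x) false).count z
  have hmem_iff : ∀ z : Int,
      z ∈ (PySem.Set.ofList arr).filter (fun k => decide ((arr.count k : Int) < 2)) ↔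
      z ∈ (PySem.List.sorted arr (fun x => x) false).filter (fun x => (PySem.List.sorted arr (fun x => x) false).count x == 1) := by
    intro z
    simp only [List.mem_filter, PySem.Set.mem_ofList, hs, hcnt,
      decide_eq_true_eq, beq_iff_eq]
    constructor
    · rintro ⟨hz, hlt⟩
      have : 1 ≤ arr.count z := List.count_pos_iff.mpr hz
      exact ⟨hz, by omega⟩
    · rintro ⟨hz, h1⟩
      exact ⟨hz, by omega⟩
  have hnd1 : ((PySem.Set.ofList arr).filter (fun k => decide ((arr.count k : Int) < 2))).Nodup :=
    (PySem.Set.nodup_ofList arr).filter _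
  have hnd2 : ((PySem.List.sorted arr (fun x => x) false).filter (fun x => (PySem.List.sorted arr (fun x => x) false).count x == 1)).Nodup := by
    rw [List.nodup_iff_count_le_one]
    intro a
    by_cases ha : a ∈ (PySem.List.sorted arr (fun x => x) false).filter (fun x => (PySem.List.sorted arr (fun x => x) false).count x == 1)
    · have h1 : (PySem.List.sorted arr (fun x => x) false).count a = 1 := by simpa using (List.mem_filter.mp ha).2
      calc ((PySem.List.sorted arr (fun x => x) false).filter (fun x => (PySem.List.sorted arr (fun x => x) false).count x == 1)).count a ≤ (PySem.List.sorted arr (fun x => x) false).count a :=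
            List.Sublist.count_le a List.filter_sublist
        _ = 1 := h1
    · simp [List.count_eq_zero.mpr ha]
  have hperm : (PySem.List.sorted
        ((PySem.Set.ofList arr).filter (fun k => decide ((arr.count k : Int) < 2)))
        (fun x => x) false).Perm ((PySem.List.sorted arr (fun x => x) false).filter (fun x => (PySem.List.sorted arr (fun x => x) false).count x == 1)) :=
    (PySem.List.sorted_perm _ _ _).trans ((List.perm_ext_iff_of_nodup hnd1 hnd2).mpr hmem_iff)
  refine PySem.List.eq_of_perm_of_pairwise_le_of_injective (fun x => x)
    (fun _ _ h => h) hperm ?_ ?_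
  · simpa using PySem.List.sorted_pairwise _ (fun x => x)
  · exact hsp.filter _
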